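-- pv_equiv track=rewrite | github.com/harryviennot/backend-enpyco | services/parser.py | detect_repeated_patterns
-- ===== SOURCE A (Python) =====
-- from typing import List, Dict, Any, Set
--
-- def detect_repeated_patterns(text: str, min_length: int = 10, max_length: int = 100) -> Set[str]:
--     """
--     Detect repeated patterns in text (likely headers/footers).
--
--     Looks for strings that appear multiple times and might be headers/footers.
--
--     Args:
--         text: Text to analyze
--         min_length: Minimum length of pattern to detect
--         max_length: Maximum length of pattern to detect
--
--     Returns:
--         Set of repeated patterns found
--     """
--     patterns = set()
--     lines = text.split('\n')
--
--     # Count occurrences of each line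
--     line_counts = {}
--     for line in lines:
--         stripped = line.strip()
--         # Only consider lines within length bounds
--         if min_length <= len(stripped) <= max_length:
--             line_counts[stripped] = line_counts.get(stripped, 0) + 1
--
--     # Consider a line a "repeated pattern" if it appears 3+ times
--     # (likely a header/footer if it appears on multiple pages)
--     for line, count in line_counts.items():
--         if count >= 3:
--             patterns.add(line)
--
--     return patterns
-- ===== SOURCE B (Python) =====
-- def detect_repeated_patterns(text: str, min_length: int = 10, max_length: int = 100):
--     """Same result as A: stripped lines within the length bounds that occur 3+ times.
--
--     No counting dict: repeatedly take the first remaining qualifying line, partition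
--     it out of the work list in one sweep, and decide its multiplicity from how much
--     the list shrank; each distinct line is handled exactly once.
--     """
--     ls = [s for s in map(str.strip, text.split('\n'))
--           if min_length <= len(s) <= max_length]
--     patterns = set()
--     while ls:
--         x = ls[0]
--         rest = [y for y in ls if y != x]
--         if len(ls) - len(rest) >= 3:
--             patterns.add(x)
--         ls = rest
--     return patterns
-- ===== Notes on version B (the rewrite author's own statement) =====
-- stated objective: alternative
-- what changed: Replaces the occurrence-counting dict and items() pass with an iterative repeated-partition extraction: take the first remaining qualifying line, remove all its copies in one sweep, and judge its multiplicity from the length drop of the work list.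
import Mathlib
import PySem

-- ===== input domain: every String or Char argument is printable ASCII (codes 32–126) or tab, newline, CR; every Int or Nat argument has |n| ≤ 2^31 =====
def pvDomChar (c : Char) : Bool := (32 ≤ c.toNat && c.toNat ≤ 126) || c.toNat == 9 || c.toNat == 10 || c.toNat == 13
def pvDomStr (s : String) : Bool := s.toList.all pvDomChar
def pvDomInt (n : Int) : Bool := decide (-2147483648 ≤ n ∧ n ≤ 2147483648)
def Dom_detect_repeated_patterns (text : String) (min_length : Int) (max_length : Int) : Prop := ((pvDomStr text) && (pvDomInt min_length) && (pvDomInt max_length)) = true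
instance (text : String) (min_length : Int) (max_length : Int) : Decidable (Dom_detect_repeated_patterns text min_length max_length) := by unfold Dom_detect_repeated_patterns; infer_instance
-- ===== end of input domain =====

-- B replaces A's occurrence-counting dict (and the items() pass) with an iterative
-- repeated-partition extraction: remove all copies of the first remaining qualifying
-- line in one sweep and judge its multiplicity from the length drop (alternative
-- decomposition; not claimed faster).


-- ===== PORT A =====
-- 'text.split("\n")': the separator is the non-empty literal "\n", so split? is always 'some';
-- '.getD []' is never hit.
def detect_repeated_patterns (text : String) (min_length : Int) (max_length : Int) : List String :=
  let lines := (PySem.Str.split? text "\n").getD []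
  let line_counts : PySem.Dict String Int :=
    lines.foldl (fun d line =>
      let stripped := PySem.Str.strip line
      if min_length ≤ PySem.Str.len stripped ∧ PySem.Str.len stripped ≤ max_length then
        d.modify stripped 0 (· + 1)
      else d) PySem.Dict.empty
  line_counts.items.foldl
    (fun patterns p => if p.2 ≥ 3 then PySem.Set.add patterns p.1 else patterns)
    PySem.Set.empty

-- ===== PORT B =====
-- The while loop of Source B: 'rest = [y for y in ls if y != x]' filters the WHOLE work
-- list including its head (which never passes, being equal to x).
def drpLoop (ls : List String) (patterns : List String) : List String :=
  match ls with
  | [] => patterns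
  | x :: t =>
    let rest := (x :: t).filter (fun y => !(y == x))
    drpLoop rest
      (if ((x :: t).length : Int) - (rest.length : Int) ≥ 3 then PySem.Set.add patterns x
       else patterns)
termination_by ls.length
decreasing_by
  simp only [List.filter_cons, beq_self_eq_true, Bool.not_true, List.length_cons]
  exact Nat.lt_succ_of_le (List.length_filter_le _ _)

def detect_repeated_patterns_alt (text : String) (min_length : Int) (max_length : Int) : List String :=
  let ls := (((PySem.Str.split? text "\n").getD []).map PySem.Str.strip).filter
    (fun s => decide (min_length ≤ PySem.Str.len s ∧ PySem.Str.len s ≤ max_length))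
  drpLoop ls PySem.Set.empty

-- ===== PRECONDITION & SPEC =====
def Spec_detect_repeated_patterns (text : String) (min_length : Int) (max_length : Int) (out : List String) : Prop := out = detect_repeated_patterns_alt text min_length max_length
instance (text : String) (min_length : Int) (max_length : Int) (out : List String) : Decidable (Spec_detect_repeated_patterns text min_length max_length out) := by unfold Spec_detect_repeated_patterns; infer_instance

-- ===== CLAIM (what is proved, stated in full; the proofs are below) =====
def Claim_equal_detect_repeated_patterns : Prop := ∀ (text : String) (min_length : Int) (max_length : Int), Dom_detect_repeated_patterns text min_length max_length → Spec_detect_repeated_patterns text min_length max_length (detect_repeated_patterns text min_length max_length)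

-- ===== LEMMAS AND PROOFS =====

-- A's items() pass: adding a guarded stream of distinct fresh keys to a set appends the filtered keys.
lemma foldl_add_guard (c : String → Int) (K acc : List String) (hnd : K.Nodup)
    (hdisj : ∀ k ∈ K, k ∉ acc) :
    (K.map (fun k => (k, c k))).foldl
      (fun patterns p => if p.2 ≥ 3 then PySem.Set.add patterns p.1 else patterns) acc
      = acc ++ K.filter (fun k => decide (3 ≤ c k)) := by
  induction K generalizing acc with
  | nil => simp
  | cons x t ih =>
    have hx : x ∉ acc := hdisj x (by simp)
    have hdisj' : ∀ k ∈ t, k ∉ PySem.Set.add acc x := by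
      intro k hk
      have hkx : k ≠ x := by
        intro h; exact (List.nodup_cons.mp hnd).1 (h ▸ hk)
      have : k ∉ acc := hdisj k (by simp [hk])
      simp [PySem.Set.mem_add, this, hkx]
    by_cases h3 : (3 : Int) ≤ c x
    · have hadd : PySem.Set.add acc x = acc ++ [x] := by
        simp [PySem.Set.add, pysem, hx]
    
      rw [List.map_cons, List.foldl_cons]
      simp only [ge_iff_le, h3, if_pos]
      rw [ih (PySem.Set.add acc x) (List.nodup_cons.mp hnd).2 hdisj', hadd]
      simp [h3]
    · have hdisj'' : ∀ k ∈ t, k ∉ acc := fun k hk => hdisj k (by simp [hk])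
      rw [List.map_cons, List.foldl_cons]
      simp only [ge_iff_le, h3, if_false]
      rw [ih acc (List.nodup_cons.mp hnd).2 hdisj'']
      simp [h3]

-- Adding already-seen elements is a no-op: filtering them out of the stream changes nothing.
lemma foldl_add_filter_mem (x : String) (t acc : List String) (hx : x ∈ acc) :
    List.foldl PySem.Set.add acc t
      = List.foldl PySem.Set.add acc (t.filter (fun y => !(y == x))) := by
  induction t generalizing acc with
  | nil => rfl
  | cons y s ih =>
    by_cases hyx : y = x
    · subst hyx
      have : PySem.Set.add acc y = acc := by simp [PySem.Set.add, pysem, hx]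
      simp [this, ih acc hx]
    · have : x ∈ PySem.Set.add acc y := by simp [PySem.Set.mem_add, hx]
      simp [hyx, ih _ this]

-- A head the stream never mentions commutes out of the accumulator.
lemma foldl_add_cons_out (x : String) (t s : List String) (ht : ∀ y ∈ t, y ≠ x) :
    List.foldl PySem.Set.add (x :: s) t = x :: List.foldl PySem.Set.add s t := by
  induction t generalizing s with
  | nil => rfl
  | cons y r ih =>
    have hyx : y ≠ x := ht y (by simp)
    have hadd : PySem.Set.add (x :: s) y = x :: PySem.Set.add s y := by
      by_cases hm : y ∈ s
      · simp [PySem.Set.add, pysem, hm, hyx]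
      · simp [PySem.Set.add, pysem, hm, hyx]
    rw [List.foldl_cons, hadd, ih _ (fun y hy => ht y (by simp [hy])), List.foldl_cons]

-- Characterisation of B's loop: it emits, in first-occurrence order, exactly the
-- elements of the work list occurring at least 3 times.
lemma drpLoop_eq (ls : List String) (acc : List String) (hd : ∀ y ∈ ls, y ∉ acc) :
    drpLoop ls acc
      = acc ++ (PySem.Set.ofList ls).filter
          (fun k => decide ((3 : Int) ≤ ((ls.count k : Nat) : Int))) := by
  match ls with
  | [] => simp [drpLoop, PySem.Set.ofList]
  | x :: t =>
    have hx : x ∉ acc := hd x (by simp)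
    set rest := t.filter (fun y => !(y == x)) with hrest
    have hrestx : ∀ y ∈ rest, y ≠ x := by
      intro y hy
      have := List.of_mem_filter hy
      simpa using this
    have hrest_mem : ∀ y ∈ rest, y ∈ t := fun y hy => List.mem_of_mem_filter hy
    -- length drop = multiplicity of x in x :: t
    have hlen : t.length = t.count x + rest.length := by
      have h := List.length_eq_countP_add_countP (l := t) (p := fun y => (y == x))
      have h2 : t.countP (fun a => decide ¬((a == x) = true)) = rest.length := by
        rw [hrest, ← List.countP_eq_length_filter]
        apply List.countP_congr
        intro a _
        cases hax : (a == x) <;> simp_all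
      rw [h2] at h
      simpa [List.count] using h
    have hguard : (((x :: t).length : Int) - (rest.length : Int) ≥ 3)
        ↔ ((3 : Int) ≤ (((x :: t).count x : Nat) : Int)) := by
      simp only [List.length_cons, List.count_cons_self, ge_iff_le]
      omega
    -- first-occurrence dedup of x :: t is x followed by dedup of rest
    have hof : PySem.Set.ofList (x :: t) = x :: PySem.Set.ofList rest := by
      rw [PySem.Set.ofList_eq_foldl, List.foldl_cons]
      have hadd : PySem.Set.add ([] : List String) x = [x] := by
        simp [PySem.Set.add, pysem]
      rw [hadd, foldl_add_filter_mem x t [x] (by simp), ← hrest,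
        foldl_add_cons_out x rest [] hrestx, PySem.Set.ofList_eq_foldl]
    -- counts of surviving elements are unchanged
    have hcount : ∀ k ∈ PySem.Set.ofList rest,
        ((x :: t).count k : Nat) = rest.count k := by
      intro k hk
      have hk' : k ∈ rest := (PySem.Set.mem_ofList rest k).mp hk
      have hkx : k ≠ x := hrestx k hk'
      have h1 : List.count k (x :: t) = List.count k t := by
        simp [Ne.symm hkx]
      rw [h1, hrest, List.count_filter (by simp [hkx])]
    have hlt : rest.length < (x :: t).length := by
      simp only [List.length_cons]
      exact Nat.lt_succ_of_le (List.length_filter_le _ _)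
    have ih := drpLoop_eq rest
    rw [drpLoop]
    simp only [List.filter_cons, beq_self_eq_true, Bool.not_true, Bool.false_eq_true,
      if_false, ← hrest]
    by_cases h3 : (((x :: t).length : Int) - (rest.length : Int) ≥ 3)
    · have hc : (3 : Int) ≤ (((x :: t).count x : Nat) : Int) := hguard.mp h3
      have hadd : PySem.Set.add acc x = acc ++ [x] := by
        simp [PySem.Set.add, pysem, hx]
      rw [if_pos h3, ih (PySem.Set.add acc x)
        (by intro y hy
            have hyt : y ∉ acc := hd y (by simp [hrest_mem y hy])
            simp [PySem.Set.mem_add, hyt, hrestx y hy]),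
        hadd, hof, List.filter_cons]
      simp only [hc, decide_true, if_pos, List.append_assoc, List.singleton_append]
      congr 2
      apply List.filter_congr
      intro k hk
      rw [hcount k hk]
    · have hc : ¬ ((3 : Int) ≤ (((x :: t).count x : Nat) : Int)) := fun h => h3 (hguard.mpr h)
      rw [if_neg h3, ih acc (fun y hy => hd y (by simp [hrest_mem y hy])), hof,
        List.filter_cons]
      simp only [hc, decide_false, if_neg, Bool.false_eq_true, not_false_iff]
      congr 1
      apply List.filter_congr
      intro k hk
      rw [hcount k hk]
termination_by ls.length
decreasing_by
  simp only [List.length_cons]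
  exact Nat.lt_succ_of_le (List.length_filter_le _ _)

-- ===== VERDICT (by name: the statement is the Claim_ definition above) =====
theorem detect_repeated_patterns_spec : Claim_equal_detect_repeated_patterns := by
  intro text min_length max_length _
  unfold Spec_detect_repeated_patterns detect_repeated_patterns detect_repeated_patterns_alt
  set lines := (PySem.Str.split? text "\n").getD [] with hlines
  set p : String → Bool :=
    (fun s => decide (min_length ≤ PySem.Str.len s ∧ PySem.Str.len s ≤ max_length)) with hp
  set ls := (lines.map PySem.Str.strip).filter p with hls
  -- A's dict is Counter(ls)
  have hdict : lines.foldl (fun d line =>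
      let stripped := PySem.Str.strip line
      if min_length ≤ PySem.Str.len stripped ∧ PySem.Str.len stripped ≤ max_length then
        d.modify stripped 0 (· + 1)
      else d) PySem.Dict.empty = PySem.Dict.counter ls := by
    rw [PySem.Dict.counter, hls, List.foldl_filter, List.foldl_map]
    simp only [hp, decide_eq_true_eq]
  simp only [hdict, PySem.Dict.items_counter]
  rw [foldl_add_guard (fun k => ((ls.count k : Nat) : Int)) (PySem.Set.ofList ls)
        PySem.Set.empty (PySem.Set.nodup_ofList ls) (by intro k _ h; simp [PySem.Set.empty] at h),
      drpLoop_eq ls PySem.Set.empty (by intro y _ h; simp [PySem.Set.empty] at h)]
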